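-- pv_equiv track=rewrite | github.com/Uneithem/FIPS-140-Randomness-Check | main.py | SeriesLen
-- ===== SOURCE A (Python) =====
-- def SeriesLen(s):
--     s_ones = s.split('0')
--     s_zeros = s.split('1')
--     ranges_1 = {
--         '1': 0,
--         '2': 0,
--         '3': 0,
--         '4': 0,
--         '5': 0,
--         '6+': 0
--     }
--     ranges_0 = {
--         '1': 0,
--         '2': 0,
--         '3': 0,
--         '4': 0,
--         '5': 0,
--         '6+': 0
--     }
--     for k in range(len(s_ones)):
--         if len(s_ones[k]) == 1:
--             ranges_1['1'] += 1
--         elif len(s_ones[k]) == 2: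
--             ranges_1['2'] += 1
--         elif len(s_ones[k]) == 3:
--             ranges_1['3'] += 1
--         elif len(s_ones[k]) == 4:
--             ranges_1['4'] += 1
--         elif len(s_ones[k]) == 5:
--             ranges_1['5'] += 1
--         elif len(s_ones[k]) >= 6:
--             ranges_1['6+'] += 1
--     for k in range(len(s_zeros)):
--         if len(s_zeros[k]) == 1:
--             ranges_0['1'] += 1
--         elif len(s_zeros[k]) == 2:
--             ranges_0['2'] += 1
--         elif len(s_zeros[k]) == 3:
--             ranges_0['3'] += 1
--         elif len(s_zeros[k]) == 4:
--             ranges_0['4'] += 1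
--         elif len(s_zeros[k]) == 5:
--             ranges_0['5'] += 1
--         elif len(s_zeros[k]) >= 6:
--             ranges_0['6+'] += 1
--     if 2267 <= ranges_1['1'] <= 2733 and 1079 <= ranges_1['2'] <= 1421 and 503 <= ranges_1['3'] <= 748 and 402 >= \
--             ranges_1['4'] >= 223 >= ranges_1['5'] >= 90 and 90 <= ranges_1['6+'] <= 223:
--         k1 = True
--     else:
--         k1 = False
--     if 2267 <= ranges_0['1'] <= 2733 and 1079 <= ranges_0['2'] <= 1421 and 503 <= ranges_0['3'] <= 748 and 402 >= \
--             ranges_0['4'] >= 223 >= ranges_0['5'] >= 90 and 90 <= ranges_0['6+'] <= 223: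
--         k0 = True
--     else:
--         k0 = False
--     return k0 and k1
-- ===== SOURCE B (Python) =====
-- def _bucket(c, n):
--     if n >= 1:
--         c[min(n, 6) - 1] += 1
--
-- def _check(c):
--     return (2267 <= c[0] <= 2733 and 1079 <= c[1] <= 1421 and 503 <= c[2] <= 748
--             and 223 <= c[3] <= 402 and 90 <= c[4] <= 223 and 90 <= c[5] <= 223)
--
-- def SeriesLen(s):
--     # single pass: two independent run-length counters instead of two splits + two loops
--     c1 = [0, 0, 0, 0, 0, 0]  # runs of non-'0' chars (segments of s.split('0'))
--     c0 = [0, 0, 0, 0, 0, 0]  # runs of non-'1' chars (segments of s.split('1'))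
--     run1 = 0
--     run0 = 0
--     for ch in s:
--         if ch == '0':
--             _bucket(c1, run1)
--             run1 = 0
--         else:
--             run1 += 1
--         if ch == '1':
--             _bucket(c0, run0)
--             run0 = 0
--         else:
--             run0 += 1
--     _bucket(c1, run1)
--     _bucket(c0, run0)
--     return _check(c0) and _check(c1)
-- ===== Notes on version B (the rewrite author's own statement) =====
-- stated objective: faster
-- what changed: Replaces the two splits (which materialize every segment string) and the two indexed loops over them with one pass over the characters maintaining two independent run-length counters bucketed into two 6-slot count arrays.
import Mathlib
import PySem

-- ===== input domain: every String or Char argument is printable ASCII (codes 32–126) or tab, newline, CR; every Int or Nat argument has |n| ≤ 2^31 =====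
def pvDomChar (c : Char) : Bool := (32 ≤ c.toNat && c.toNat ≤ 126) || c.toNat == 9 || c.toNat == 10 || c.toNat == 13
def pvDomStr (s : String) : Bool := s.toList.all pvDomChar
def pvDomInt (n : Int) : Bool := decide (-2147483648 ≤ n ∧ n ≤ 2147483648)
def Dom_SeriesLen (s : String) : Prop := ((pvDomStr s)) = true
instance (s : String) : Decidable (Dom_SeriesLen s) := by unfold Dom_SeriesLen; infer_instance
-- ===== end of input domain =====

-- B replaces A's two splits + two indexed loops by one pass with two run-length counters (O(1) extra space).

-- ===== PORT A =====
-- body of A's two identical for-loops (the if/elif chain on the segment length)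
def pvStepA (d : PySem.Dict String Int) (seg : List Char) : PySem.Dict String Int :=
  if seg.length = 1 then d.modify "1" 0 (· + 1)
  else if seg.length = 2 then d.modify "2" 0 (· + 1)
  else if seg.length = 3 then d.modify "3" 0 (· + 1)
  else if seg.length = 4 then d.modify "4" 0 (· + 1)
  else if seg.length = 5 then d.modify "5" 0 (· + 1)
  else if 6 ≤ seg.length then d.modify "6+" 0 (· + 1)
  else d

def SeriesLen (s : String) : Bool :=
  let s_ones := PySem.Chars.splitOn s.toList "0".toList
  let s_zeros := PySem.Chars.splitOn s.toList "1".toList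
  let ranges_1 : PySem.Dict String Int :=
    PySem.Dict.ofList [("1", 0), ("2", 0), ("3", 0), ("4", 0), ("5", 0), ("6+", 0)]
  let ranges_0 : PySem.Dict String Int :=
    PySem.Dict.ofList [("1", 0), ("2", 0), ("3", 0), ("4", 0), ("5", 0), ("6+", 0)]
  let ranges_1 := (PySem.List.pyRange 0 (s_ones.length : Int) 1).foldl
    (fun d k => pvStepA d (PySem.List.pyGetD s_ones k [])) ranges_1
  let ranges_0 := (PySem.List.pyRange 0 (s_zeros.length : Int) 1).foldl
    (fun d k => pvStepA d (PySem.List.pyGetD s_zeros k [])) ranges_0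
  let k1 :=
    if 2267 ≤ ranges_1.getD "1" 0 ∧ ranges_1.getD "1" 0 ≤ 2733 ∧
       1079 ≤ ranges_1.getD "2" 0 ∧ ranges_1.getD "2" 0 ≤ 1421 ∧
       503 ≤ ranges_1.getD "3" 0 ∧ ranges_1.getD "3" 0 ≤ 748 ∧
       402 ≥ ranges_1.getD "4" 0 ∧ ranges_1.getD "4" 0 ≥ 223 ∧
       223 ≥ ranges_1.getD "5" 0 ∧ ranges_1.getD "5" 0 ≥ 90 ∧
       90 ≤ ranges_1.getD "6+" 0 ∧ ranges_1.getD "6+" 0 ≤ 223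
    then true else false
  let k0 :=
    if 2267 ≤ ranges_0.getD "1" 0 ∧ ranges_0.getD "1" 0 ≤ 2733 ∧
       1079 ≤ ranges_0.getD "2" 0 ∧ ranges_0.getD "2" 0 ≤ 1421 ∧
       503 ≤ ranges_0.getD "3" 0 ∧ ranges_0.getD "3" 0 ≤ 748 ∧
       402 ≥ ranges_0.getD "4" 0 ∧ ranges_0.getD "4" 0 ≥ 223 ∧
       223 ≥ ranges_0.getD "5" 0 ∧ ranges_0.getD "5" 0 ≥ 90 ∧
       90 ≤ ranges_0.getD "6+" 0 ∧ ranges_0.getD "6+" 0 ≤ 223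
    then true else false
  k0 && k1

-- ===== PORT B =====
def pvBucket (c : List Int) (n : Int) : List Int :=
  if 1 ≤ n then PySem.List.pySetD c (min n 6 - 1) (PySem.List.pyGetD c (min n 6 - 1) 0 + 1)
  else c

def pvCheck (c : List Int) : Bool :=
  decide (2267 ≤ PySem.List.pyGetD c 0 0 ∧ PySem.List.pyGetD c 0 0 ≤ 2733 ∧
          1079 ≤ PySem.List.pyGetD c 1 0 ∧ PySem.List.pyGetD c 1 0 ≤ 1421 ∧
          503 ≤ PySem.List.pyGetD c 2 0 ∧ PySem.List.pyGetD c 2 0 ≤ 748 ∧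
          223 ≤ PySem.List.pyGetD c 3 0 ∧ PySem.List.pyGetD c 3 0 ≤ 402 ∧
          90 ≤ PySem.List.pyGetD c 4 0 ∧ PySem.List.pyGetD c 4 0 ≤ 223 ∧
          90 ≤ PySem.List.pyGetD c 5 0 ∧ PySem.List.pyGetD c 5 0 ≤ 223)

def pvStepB (st : Int × Int × List Int × List Int) (ch : Char) : Int × Int × List Int × List Int :=
  let p1 := if ch = '0' then ((0 : Int), pvBucket st.2.2.1 st.1) else (st.1 + 1, st.2.2.1)
  let p0 := if ch = '1' then ((0 : Int), pvBucket st.2.2.2 st.2.1) else (st.2.1 + 1, st.2.2.2)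
  (p1.1, p0.1, p1.2, p0.2)

def SeriesLen_alt (s : String) : Bool :=
  let st := s.toList.foldl pvStepB (0, 0, [0, 0, 0, 0, 0, 0], [0, 0, 0, 0, 0, 0])
  let c1 := pvBucket st.2.2.1 st.1
  let c0 := pvBucket st.2.2.2 st.2.1
  pvCheck c0 && pvCheck c1

-- ===== PRECONDITION & SPEC =====
def Spec_SeriesLen (s : String) (out : Bool) : Prop := out = SeriesLen_alt s
instance (s : String) (out : Bool) : Decidable (Spec_SeriesLen s out) := by unfold Spec_SeriesLen; infer_instance

-- ===== CLAIM (what is proved, stated in full; the proofs are below) =====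
def Claim_equal_SeriesLen : Prop := ∀ (s : String), Dom_SeriesLen s → Spec_SeriesLen s (SeriesLen s)

-- ===== LEMMAS AND PROOFS =====

-- s.split(d) for a one-character separator, as a plain structural recursion
def pvSplitAux (d : Char) : List Char → List Char → List (List Char)
  | [], cur => [cur.reverse]
  | c :: rest, cur => if c = d then cur.reverse :: pvSplitAux d rest [] else pvSplitAux d rest (c :: cur)

theorem pvGo (d : Char) : ∀ (l : List Char) (fuel : Nat) (cur : List Char) (acc : List (List Char)),
    l.length ≤ fuel →
    PySem.Chars.splitOn.go [d] fuel l cur acc = acc.reverse ++ pvSplitAux d l cur := by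
  intro l
  induction l with
  | nil =>
    intro fuel cur acc _
    cases fuel <;> simp [PySem.Chars.splitOn.go, pvSplitAux]
  | cons c rest ih =>
    intro fuel cur acc h
    cases fuel with
    | zero => simp at h
    | succ f =>
      have hf : rest.length ≤ f := by simpa using h
      by_cases hc : c = d
      · subst hc
        simp only [PySem.Chars.splitOn.go]
        rw [if_pos (by simp)]
        simp only [List.length_cons, List.length_nil, List.drop_succ_cons, List.drop_zero]
        rw [ih f [] (cur.reverse :: acc) hf]
        simp [pvSplitAux]
      · simp only [PySem.Chars.splitOn.go]
        rw [if_neg (by simp [List.isPrefixOf]; intro h'; exact absurd h'.symm hc)]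
        rw [ih f (c :: cur) acc hf]
        simp [pvSplitAux, hc]

theorem pvSplitOn (d : Char) (l : List Char) :
    PySem.Chars.splitOn l [d] = pvSplitAux d l [] := by
  unfold PySem.Chars.splitOn
  rw [pvGo d l (l.length + 1) [] [] (by omega)]
  simp

-- count of segments satisfying p, as an Int
def pvCnt (p : List Char → Bool) : List (List Char) → Int
  | [] => 0
  | t :: rest => pvCnt p rest + (if p t then 1 else 0)

def pvMkd (a1 a2 a3 a4 a5 a6 : Int) : PySem.Dict String Int :=
  PySem.Dict.mk [("1", a1), ("2", a2), ("3", a3), ("4", a4), ("5", a5), ("6+", a6)]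

def pvC1 : List Char → Bool := fun t => t.length = 1
def pvC2 : List Char → Bool := fun t => t.length = 2
def pvC3 : List Char → Bool := fun t => t.length = 3
def pvC4 : List Char → Bool := fun t => t.length = 4
def pvC5 : List Char → Bool := fun t => t.length = 5
def pvC6 : List Char → Bool := fun t => 6 ≤ t.length

theorem pvMd1 (a1 a2 a3 a4 a5 a6 : Int) :
    (pvMkd a1 a2 a3 a4 a5 a6).modify "1" 0 (· + 1) = pvMkd (a1 + 1) a2 a3 a4 a5 a6 := rfl
theorem pvMd2 (a1 a2 a3 a4 a5 a6 : Int) :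
    (pvMkd a1 a2 a3 a4 a5 a6).modify "2" 0 (· + 1) = pvMkd a1 (a2 + 1) a3 a4 a5 a6 := rfl
theorem pvMd3 (a1 a2 a3 a4 a5 a6 : Int) :
    (pvMkd a1 a2 a3 a4 a5 a6).modify "3" 0 (· + 1) = pvMkd a1 a2 (a3 + 1) a4 a5 a6 := rfl
theorem pvMd4 (a1 a2 a3 a4 a5 a6 : Int) :
    (pvMkd a1 a2 a3 a4 a5 a6).modify "4" 0 (· + 1) = pvMkd a1 a2 a3 (a4 + 1) a5 a6 := rfl
theorem pvMd5 (a1 a2 a3 a4 a5 a6 : Int) :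
    (pvMkd a1 a2 a3 a4 a5 a6).modify "5" 0 (· + 1) = pvMkd a1 a2 a3 a4 (a5 + 1) a6 := rfl
theorem pvMd6 (a1 a2 a3 a4 a5 a6 : Int) :
    (pvMkd a1 a2 a3 a4 a5 a6).modify "6+" 0 (· + 1) = pvMkd a1 a2 a3 a4 a5 (a6 + 1) := rfl

-- A's loop over the segments, in closed form
theorem pvFoldA (segs : List (List Char)) : ∀ a1 a2 a3 a4 a5 a6 : Int,
    segs.foldl pvStepA (pvMkd a1 a2 a3 a4 a5 a6) =
      pvMkd (a1 + pvCnt pvC1 segs) (a2 + pvCnt pvC2 segs) (a3 + pvCnt pvC3 segs)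
            (a4 + pvCnt pvC4 segs) (a5 + pvCnt pvC5 segs) (a6 + pvCnt pvC6 segs) := by
  induction segs with
  | nil => intro a1 a2 a3 a4 a5 a6; simp [pvCnt]
  | cons seg rest ih =>
    intro a1 a2 a3 a4 a5 a6
    simp only [List.foldl_cons]
    by_cases h1 : seg.length = 1
    · rw [show pvStepA (pvMkd a1 a2 a3 a4 a5 a6) seg = pvMkd (a1 + 1) a2 a3 a4 a5 a6 from by
          unfold pvStepA; rw [if_pos h1]; exact pvMd1 a1 a2 a3 a4 a5 a6, ih]
      simp [pvCnt, pvMkd, pvC1, pvC2, pvC3, pvC4, pvC5, pvC6, h1]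
      try omega
    · by_cases h2 : seg.length = 2
      · rw [show pvStepA (pvMkd a1 a2 a3 a4 a5 a6) seg = pvMkd a1 (a2 + 1) a3 a4 a5 a6 from by
            unfold pvStepA; rw [if_neg h1, if_pos h2]; exact pvMd2 a1 a2 a3 a4 a5 a6, ih]
        simp [pvCnt, pvMkd, pvC1, pvC2, pvC3, pvC4, pvC5, pvC6, h1, h2]
        try omega
      · by_cases h3 : seg.length = 3
        · rw [show pvStepA (pvMkd a1 a2 a3 a4 a5 a6) seg = pvMkd a1 a2 (a3 + 1) a4 a5 a6 from by
              unfold pvStepA; rw [if_neg h1, if_neg h2, if_pos h3]; exact pvMd3 a1 a2 a3 a4 a5 a6, ih]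
          simp [pvCnt, pvMkd, pvC1, pvC2, pvC3, pvC4, pvC5, pvC6, h1, h2, h3]
          try omega
        · by_cases h4 : seg.length = 4
          · rw [show pvStepA (pvMkd a1 a2 a3 a4 a5 a6) seg = pvMkd a1 a2 a3 (a4 + 1) a5 a6 from by
                unfold pvStepA; rw [if_neg h1, if_neg h2, if_neg h3, if_pos h4]
                exact pvMd4 a1 a2 a3 a4 a5 a6, ih]
            simp [pvCnt, pvMkd, pvC1, pvC2, pvC3, pvC4, pvC5, pvC6, h1, h2, h3, h4]
            try omega
          · by_cases h5 : seg.length = 5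
            · rw [show pvStepA (pvMkd a1 a2 a3 a4 a5 a6) seg = pvMkd a1 a2 a3 a4 (a5 + 1) a6 from by
                  unfold pvStepA; rw [if_neg h1, if_neg h2, if_neg h3, if_neg h4, if_pos h5]
                  exact pvMd5 a1 a2 a3 a4 a5 a6, ih]
              simp [pvCnt, pvMkd, pvC1, pvC2, pvC3, pvC4, pvC5, pvC6, h1, h2, h3, h4, h5]
              try omega
            · by_cases h6 : 6 ≤ seg.length
              · rw [show pvStepA (pvMkd a1 a2 a3 a4 a5 a6) seg = pvMkd a1 a2 a3 a4 a5 (a6 + 1) from by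
                    unfold pvStepA
                    rw [if_neg h1, if_neg h2, if_neg h3, if_neg h4, if_neg h5, if_pos h6]
                    exact pvMd6 a1 a2 a3 a4 a5 a6, ih]
                simp [pvCnt, pvMkd, pvC1, pvC2, pvC3, pvC4, pvC5, pvC6, h1, h2, h3, h4, h5, h6]
                try omega
              · rw [show pvStepA (pvMkd a1 a2 a3 a4 a5 a6) seg = pvMkd a1 a2 a3 a4 a5 a6 from by
                    unfold pvStepA
                    rw [if_neg h1, if_neg h2, if_neg h3, if_neg h4, if_neg h5, if_neg h6], ih]
                simp [pvCnt, pvMkd, pvC1, pvC2, pvC3, pvC4, pvC5, pvC6, h1, h2, h3, h4, h5, h6]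
                try omega

theorem pvBk1 (b1 b2 b3 b4 b5 b6 : Int) :
    pvBucket [b1, b2, b3, b4, b5, b6] 1 = [b1 + 1, b2, b3, b4, b5, b6] := rfl
theorem pvBk2 (b1 b2 b3 b4 b5 b6 : Int) :
    pvBucket [b1, b2, b3, b4, b5, b6] 2 = [b1, b2 + 1, b3, b4, b5, b6] := rfl
theorem pvBk3 (b1 b2 b3 b4 b5 b6 : Int) :
    pvBucket [b1, b2, b3, b4, b5, b6] 3 = [b1, b2, b3 + 1, b4, b5, b6] := rfl
theorem pvBk4 (b1 b2 b3 b4 b5 b6 : Int) :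
    pvBucket [b1, b2, b3, b4, b5, b6] 4 = [b1, b2, b3, b4 + 1, b5, b6] := rfl
theorem pvBk5 (b1 b2 b3 b4 b5 b6 : Int) :
    pvBucket [b1, b2, b3, b4, b5, b6] 5 = [b1, b2, b3, b4, b5 + 1, b6] := rfl
theorem pvBk6 (b1 b2 b3 b4 b5 b6 : Int) (n : Int) (hn : 6 ≤ n) :
    pvBucket [b1, b2, b3, b4, b5, b6] n = [b1, b2, b3, b4, b5, b6 + 1] := by
  unfold pvBucket
  rw [if_pos (by omega), show min n 6 - 1 = 5 from by omega]
  rfl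

-- B's bucket-fold over the segments, in closed form
theorem pvFoldB (segs : List (List Char)) : ∀ b1 b2 b3 b4 b5 b6 : Int,
    segs.foldl (fun c seg => pvBucket c ((seg.length : Int))) [b1, b2, b3, b4, b5, b6] =
      [b1 + pvCnt pvC1 segs, b2 + pvCnt pvC2 segs, b3 + pvCnt pvC3 segs,
       b4 + pvCnt pvC4 segs, b5 + pvCnt pvC5 segs, b6 + pvCnt pvC6 segs] := by
  induction segs with
  | nil => intro b1 b2 b3 b4 b5 b6; simp [pvCnt]
  | cons seg rest ih =>
    intro b1 b2 b3 b4 b5 b6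
    simp only [List.foldl_cons]
    by_cases h1 : seg.length = 1
    · rw [show ((seg.length : Int)) = 1 from by simp [h1], pvBk1, ih]
      simp [pvCnt, pvMkd, pvC1, pvC2, pvC3, pvC4, pvC5, pvC6, h1]
      try omega
    · by_cases h2 : seg.length = 2
      · rw [show ((seg.length : Int)) = 2 from by simp [h2], pvBk2, ih]
        simp [pvCnt, pvMkd, pvC1, pvC2, pvC3, pvC4, pvC5, pvC6, h1, h2]
        try omega
      · by_cases h3 : seg.length = 3
        · rw [show ((seg.length : Int)) = 3 from by simp [h3], pvBk3, ih]
          simp [pvCnt, pvMkd, pvC1, pvC2, pvC3, pvC4, pvC5, pvC6, h1, h2, h3]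
          try omega
        · by_cases h4 : seg.length = 4
          · rw [show ((seg.length : Int)) = 4 from by simp [h4], pvBk4, ih]
            simp [pvCnt, pvMkd, pvC1, pvC2, pvC3, pvC4, pvC5, pvC6, h1, h2, h3, h4]
            try omega
          · by_cases h5 : seg.length = 5
            · rw [show ((seg.length : Int)) = 5 from by simp [h5], pvBk5, ih]
              simp [pvCnt, pvMkd, pvC1, pvC2, pvC3, pvC4, pvC5, pvC6, h1, h2, h3, h4, h5]
              try omega
            · by_cases h6 : 6 ≤ seg.length
              · rw [pvBk6 _ _ _ _ _ _ _ (by exact_mod_cast Nat.cast_le.mpr h6), ih]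
                simp [pvCnt, pvMkd, pvC1, pvC2, pvC3, pvC4, pvC5, pvC6, h1, h2, h3, h4, h5, h6]
                try omega
              · have h0 : seg.length = 0 := by omega
                rw [show pvBucket [b1, b2, b3, b4, b5, b6] ((seg.length : Int)) =
                      [b1, b2, b3, b4, b5, b6] from by
                    unfold pvBucket; rw [if_neg (by simp [h0])], ih]
                simp [pvCnt, pvMkd, pvC1, pvC2, pvC3, pvC4, pvC5, pvC6, h1, h2, h3, h4, h5, h6]

-- one run-length counter with its count array
def pvStep1 (d : Char) (st : Int × List Int) (ch : Char) : Int × List Int :=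
  if ch = d then (0, pvBucket st.2 st.1) else (st.1 + 1, st.2)

-- the combined B loop is the pair of the two independent single-counter loops
theorem pvPair (cs : List Char) : ∀ (r1 r0 : Int) (c1 c0 : List Int),
    cs.foldl pvStepB (r1, r0, c1, c0) =
      ((cs.foldl (pvStep1 '0') (r1, c1)).1, (cs.foldl (pvStep1 '1') (r0, c0)).1,
       (cs.foldl (pvStep1 '0') (r1, c1)).2, (cs.foldl (pvStep1 '1') (r0, c0)).2) := by
  induction cs with
  | nil => intro r1 r0 c1 c0; rfl
  | cons ch cs ih =>
    intro r1 r0 c1 c0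
    simp only [List.foldl_cons]
    by_cases h0 : ch = '0' <;> by_cases h1 : ch = '1' <;>
      simp_all [pvStepB, pvStep1, ih]

-- single-counter loop + final bucket = bucket-fold over the split segments
theorem pvLoopSeg (d : Char) (cs : List Char) : ∀ (cur : List Char) (c : List Int),
    pvBucket (cs.foldl (pvStep1 d) ((cur.length : Int), c)).2
        (cs.foldl (pvStep1 d) ((cur.length : Int), c)).1 =
      (pvSplitAux d cs cur).foldl (fun c seg => pvBucket c ((seg.length : Int))) c := by
  induction cs with
  | nil => intro cur c; simp [pvSplitAux]
  | cons ch cs ih =>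
    intro cur c
    simp only [List.foldl_cons]
    by_cases h : ch = d
    · rw [show pvStep1 d ((cur.length : Int), c) ch = (((([] : List Char)).length : Int),
          pvBucket c ((cur.length : Int))) from by simp [pvStep1, h]]
      rw [ih [] (pvBucket c ((cur.length : Int)))]
      simp [pvSplitAux, h]
    · rw [show pvStep1 d ((cur.length : Int), c) ch = ((((ch :: cur)).length : Int), c)
          from by simp [pvStep1, h]]
      rw [ih (ch :: cur) c]
      simp [pvSplitAux, h]

theorem pvLoopSeg0 (d : Char) (cs : List Char) (c : List Int) :
    pvBucket (cs.foldl (pvStep1 d) (0, c)).2 (cs.foldl (pvStep1 d) (0, c)).1 =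
      (pvSplitAux d cs []).foldl (fun c seg => pvBucket c ((seg.length : Int))) c := by
  simpa using pvLoopSeg d cs [] c

theorem pvGd1 (a1 a2 a3 a4 a5 a6 : Int) : (pvMkd a1 a2 a3 a4 a5 a6).getD "1" 0 = a1 := rfl
theorem pvGd2 (a1 a2 a3 a4 a5 a6 : Int) : (pvMkd a1 a2 a3 a4 a5 a6).getD "2" 0 = a2 := rfl
theorem pvGd3 (a1 a2 a3 a4 a5 a6 : Int) : (pvMkd a1 a2 a3 a4 a5 a6).getD "3" 0 = a3 := rfl
theorem pvGd4 (a1 a2 a3 a4 a5 a6 : Int) : (pvMkd a1 a2 a3 a4 a5 a6).getD "4" 0 = a4 := rfl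
theorem pvGd5 (a1 a2 a3 a4 a5 a6 : Int) : (pvMkd a1 a2 a3 a4 a5 a6).getD "5" 0 = a5 := rfl
theorem pvGd6 (a1 a2 a3 a4 a5 a6 : Int) : (pvMkd a1 a2 a3 a4 a5 a6).getD "6+" 0 = a6 := rfl

theorem pvPg0 (b1 b2 b3 b4 b5 b6 : Int) : PySem.List.pyGetD [b1, b2, b3, b4, b5, b6] 0 0 = b1 := rfl
theorem pvPg1 (b1 b2 b3 b4 b5 b6 : Int) : PySem.List.pyGetD [b1, b2, b3, b4, b5, b6] 1 0 = b2 := rfl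
theorem pvPg2 (b1 b2 b3 b4 b5 b6 : Int) : PySem.List.pyGetD [b1, b2, b3, b4, b5, b6] 2 0 = b3 := rfl
theorem pvPg3 (b1 b2 b3 b4 b5 b6 : Int) : PySem.List.pyGetD [b1, b2, b3, b4, b5, b6] 3 0 = b4 := rfl
theorem pvPg4 (b1 b2 b3 b4 b5 b6 : Int) : PySem.List.pyGetD [b1, b2, b3, b4, b5, b6] 4 0 = b5 := rfl
theorem pvPg5 (b1 b2 b3 b4 b5 b6 : Int) : PySem.List.pyGetD [b1, b2, b3, b4, b5, b6] 5 0 = b6 := rfl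

theorem pvIfDecide (P : Prop) [Decidable P] : (if P then true else false) = decide P := by
  by_cases h : P <;> simp [h]

-- ===== VERDICT (by name: the statement is the Claim_ definition above) =====
theorem SeriesLen_spec : Claim_equal_SeriesLen := by
  intro s _
  unfold Spec_SeriesLen SeriesLen SeriesLen_alt
  simp only []
  rw [PySem.List.foldl_pyRange_zero_pyGetD' (PySem.Chars.splitOn s.toList "0".toList) [] pvStepA,
      PySem.List.foldl_pyRange_zero_pyGetD' (PySem.Chars.splitOn s.toList "1".toList) [] pvStepA]
  rw [show ("0".toList) = ['0'] from rfl, show ("1".toList) = ['1'] from rfl,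
      pvSplitOn '0' s.toList, pvSplitOn '1' s.toList]
  rw [show (PySem.Dict.ofList [("1", (0:Int)), ("2", 0), ("3", 0), ("4", 0), ("5", 0), ("6+", 0)])
        = pvMkd 0 0 0 0 0 0 from by decide]
  rw [pvFoldA, pvFoldA]
  rw [pvPair]
  rw [pvLoopSeg0, pvLoopSeg0]
  rw [pvFoldB, pvFoldB]
  simp only [pvGd1, pvGd2, pvGd3, pvGd4, pvGd5, pvGd6]
  unfold pvCheck
  simp only [pvPg0, pvPg1, pvPg2, pvPg3, pvPg4, pvPg5]
  simp only [pvIfDecide]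
  congr 1 <;> (rw [decide_eq_decide]; omega)
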